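-- pv_equiv track=rewrite | github.com/dvklopfenstein/prtgitlog | src/gitlog_prt/gitlog.py | _get_data_letterstr
-- ===== SOURCE A (Python) =====
-- import collections as cx
--
-- def _get_data_letterstr(filename2checksums, ci2chr):
--   """Return list of files, each with its checkins represented by an ASCII art letter string."""
--   ntobj = cx.namedtuple("NtDataLet", "letterstr filename")
--   ret = []
--   prtlet = set()
--   if filename2checksums is not None:
--     for data, chkin_ids in filename2checksums.items():
--       # ci2chr:  OrderedDict([('4c433a5', 'A'), ('92301ba', 'B')])
--       ci_lst = [let if ci in chkin_ids else "." for ci, let in ci2chr.items()]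
--       prtlet |= set(ci_lst)
--       ret.append(ntobj(letterstr="".join(ci_lst), filename=data))
--   return ret, prtlet
-- ===== SOURCE B (Python) =====
-- import collections as cx
--
-- def _get_data_letterstr(filename2checksums, ci2chr):
--     """Return list of files, each with its checkins represented by an ASCII art letter string."""
--     ntobj = cx.namedtuple("NtDataLet", "letterstr filename")
--     ret = []
--     prtlet = set()
--     if filename2checksums is not None:
--         # inverted index: checkin id -> (column position, letter); built once
--         index = {ci: (pos, let) for pos, (ci, let) in enumerate(ci2chr.items())}
--         n = len(ci2chr)
--         for data, chkin_ids in filename2checksums.items():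
--             slots = ["."] * n
--             for ci in chkin_ids:
--                 hit = index.get(ci)
--                 if hit is not None:
--                     slots[hit[0]] = hit[1]
--             prtlet.update(slots)
--             ret.append(ntobj(letterstr="".join(slots), filename=data))
--     return ret, prtlet
-- ===== Notes on version B (the rewrite author's own statement) =====
-- stated objective: faster
-- what changed: B builds an inverted index from checkin id to (position, letter) once, then fills a per-file slot array by scanning only that file's checkin ids, instead of A's rescan of all of ci2chr with an 'in chkin_ids' list test per column.
import Mathlib
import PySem

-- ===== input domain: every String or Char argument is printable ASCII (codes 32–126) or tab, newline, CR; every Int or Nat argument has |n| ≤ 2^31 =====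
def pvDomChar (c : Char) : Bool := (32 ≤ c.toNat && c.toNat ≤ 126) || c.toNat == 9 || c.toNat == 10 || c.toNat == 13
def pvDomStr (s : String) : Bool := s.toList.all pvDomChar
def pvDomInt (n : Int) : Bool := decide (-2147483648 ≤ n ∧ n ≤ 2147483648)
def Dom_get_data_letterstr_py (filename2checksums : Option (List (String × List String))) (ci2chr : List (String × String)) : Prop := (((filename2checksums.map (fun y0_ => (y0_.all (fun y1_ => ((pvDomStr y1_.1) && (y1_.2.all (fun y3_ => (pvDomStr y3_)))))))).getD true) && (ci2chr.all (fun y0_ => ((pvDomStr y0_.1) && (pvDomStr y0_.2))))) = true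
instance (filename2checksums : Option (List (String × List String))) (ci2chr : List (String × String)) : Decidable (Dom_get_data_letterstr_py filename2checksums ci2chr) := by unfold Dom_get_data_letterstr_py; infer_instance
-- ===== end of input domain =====

-- B replaces A's per-file rescan of ci2chr by an inverted index (checkin id -> position, letter)
-- and a per-file slot array filled from that file's own checkin ids (objective: faster).

-- ===== PORT A =====
def get_data_letterstr_py (filename2checksums : Option (List (String × List String))) (ci2chr : List (String × String)) : (List (String × String)) × List String :=
  match filename2checksums with
  | none => ([], [])
  | some items =>
      items.foldl (fun (acc : (List (String × String)) × List String) p =>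
        let ci_lst := ci2chr.map (fun q => if p.2.contains q.1 then q.2 else ".")
        (acc.1 ++ [(PySem.Str.join "" ci_lst, p.1)],
         PySem.Set.update acc.2 ci_lst)) ([], [])

-- ===== PORT B =====
-- the dict comprehension building B's inverted index over enumerate(ci2chr.items())
def pvIndex (ci2chr : List (String × String)) : PySem.Dict String (Int × String) :=
  (PySem.List.enumerate ci2chr 0).foldl (fun d p => d.insert p.2.1 (p.1, p.2.2)) PySem.Dict.empty

-- the body of B's inner loop: one checkin id writes its letter into its slot (if indexed)
def pvStep (index : PySem.Dict String (Int × String)) (sl : List String) (ci : String) : List String :=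
  match index.get? ci with
  | some hit => PySem.List.pySetD sl hit.1 hit.2
  | none => sl

def get_data_letterstr_py_alt (filename2checksums : Option (List (String × List String))) (ci2chr : List (String × String)) : (List (String × String)) × List String :=
  match filename2checksums with
  | none => ([], [])
  | some items =>
      let index := pvIndex ci2chr
      let n := ci2chr.length
      items.foldl (fun (acc : (List (String × String)) × List String) p =>
        let slots := p.2.foldl (pvStep index) (List.replicate n ".")
        (acc.1 ++ [(PySem.Str.join "" slots, p.1)],
         PySem.Set.update acc.2 slots)) ([], [])

-- ===== PRECONDITION & SPEC =====
-- Pre_ excludes association lists whose ci2chr has duplicate keys: those do not represent any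
-- Python dict (A's ci2chr is a dict, whose construction already collapses duplicates), so A's
-- behaviour on them is not defined by the source.
def Pre_get_data_letterstr_py (filename2checksums : Option (List (String × List String))) (ci2chr : List (String × String)) : Prop :=
  (ci2chr.map Prod.fst).Nodup
instance (filename2checksums : Option (List (String × List String))) (ci2chr : List (String × String)) : Decidable (Pre_get_data_letterstr_py filename2checksums ci2chr) := by unfold Pre_get_data_letterstr_py; infer_instance

def pvWitness_get_data_letterstr_py : (Option (List (String × List String))) × (List (String × String)) :=
  (some [("gitlog.py", ["4c433a5", "zzz"]), ("README.md", [])], [("4c433a5", "A"), ("92301ba", "B")])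

def Spec_get_data_letterstr_py (filename2checksums : Option (List (String × List String))) (ci2chr : List (String × String)) (out : (List (String × String)) × List String) : Prop := out = get_data_letterstr_py_alt filename2checksums ci2chr
instance (filename2checksums : Option (List (String × List String))) (ci2chr : List (String × String)) (out : (List (String × String)) × List String) : Decidable (Spec_get_data_letterstr_py filename2checksums ci2chr out) := by unfold Spec_get_data_letterstr_py; infer_instance

-- ===== CLAIM (what is proved, stated in full; the proofs are below) =====
def Claim_equal_get_data_letterstr_py : Prop := ∀ (filename2checksums : Option (List (String × List String))) (ci2chr : List (String × String)), Dom_get_data_letterstr_py filename2checksums ci2chr → Pre_get_data_letterstr_py filename2checksums ci2chr → Spec_get_data_letterstr_py filename2checksums ci2chr (get_data_letterstr_py filename2checksums ci2chr)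

-- ===== LEMMAS AND PROOFS =====

theorem pvIndex_append_singleton (xs : List (String × String)) (x : String × String) :
    pvIndex (xs ++ [x]) = (pvIndex xs).insert x.1 ((xs.length : Int), x.2) := by
  simp [pvIndex, PySem.List.enumerate_append, PySem.List.enumerate_cons, PySem.List.enumerate_nil]

theorem pvIndex_get?_eq_some_iff (ci2chr : List (String × String))
    (h : (ci2chr.map Prod.fst).Nodup) (ci : String) (pr : Int × String) :
    (pvIndex ci2chr).get? ci = some pr ↔
      ∃ (j : Nat) (hj : j < ci2chr.length), (ci2chr[j]).1 = ci ∧ pr = ((j : Int), (ci2chr[j]).2) := by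
  induction ci2chr using List.reverseRecOn with
  | nil =>
      simp [pvIndex, PySem.List.enumerate_nil, PySem.Dict.get?_empty]
  | append_singleton xs x ih =>
      rw [pvIndex_append_singleton]
      have h' : (List.map Prod.fst xs ++ [x.1]).Nodup := by
        have hh := h
        rw [List.map_append, List.map_cons, List.map_nil] at hh
        exact hh
      have hn : (xs.map Prod.fst).Nodup := (List.nodup_append.mp h').1
      have hx : x.1 ∉ xs.map Prod.fst := by
        intro hmem
        exact ((List.nodup_append.mp h').2.2 x.1 hmem x.1 (List.mem_singleton_self _)) rfl
      rw [PySem.Dict.get?_insert]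
      by_cases hci : ci = x.1
      · subst hci
        rw [if_pos rfl]
        constructor
        · rintro h'
          refine ⟨xs.length, by simp, ?_, ?_⟩
          · simp
          · simpa using h'.symm
        · rintro ⟨j, hj, hkey, hpr⟩
          by_cases hjx : j < xs.length
          · exfalso
            apply hx
            have : (xs ++ [x])[j] = xs[j] := List.getElem_append_left hjx
            rw [this] at hkey
            exact hkey ▸ (List.mem_map.mpr ⟨xs[j], List.getElem_mem _, rfl⟩)
          · have hj' : j = xs.length := by
              have := hj; simp at this; omega
            subst hj'
            have : (xs ++ [x])[xs.length] = x := by simp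
            rw [this] at hpr
            simp [hpr]
      · rw [if_neg hci, ih hn]
        constructor
        · rintro ⟨j, hj, hkey, hpr⟩
          exact ⟨j, by simp; omega, by rw [List.getElem_append_left hj]; exact hkey,
                 by rw [List.getElem_append_left hj]; exact hpr⟩
        · rintro ⟨j, hj, hkey, hpr⟩
          have hjx : j < xs.length := by
            by_contra hge
            have hj' : j = xs.length := by simp at hj; omega
            subst hj'
            have : (xs ++ [x])[xs.length] = x := by simp
            rw [this] at hkey
            exact hci hkey.symm
          exact ⟨j, hjx, by rw [List.getElem_append_left hjx] at hkey; exact hkey,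
                 by rw [List.getElem_append_left hjx] at hpr; exact hpr⟩

theorem length_pvStep (index : PySem.Dict String (Int × String)) (sl : List String) (ci : String) :
    (pvStep index sl ci).length = sl.length := by
  unfold pvStep
  cases h : index.get? ci with
  | none => rfl
  | some hit => simp [PySem.List.length_pySetD]

theorem foldl_pvStep_getElem? (ci2chr : List (String × String))
    (h : (ci2chr.map Prod.fst).Nodup) (l : List String) :
    ∀ (sl : List String), sl.length = ci2chr.length → ∀ (j : Nat) (hj : j < ci2chr.length),
    (l.foldl (pvStep (pvIndex ci2chr)) sl)[j]? =
      if (ci2chr[j]'hj).1 ∈ l then some (ci2chr[j]'hj).2 else sl[j]? := by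
  induction l with
  | nil => intro sl hlen j hj; simp
  | cons ci l ih =>
      intro sl hlen j hj
      have hlen' : (pvStep (pvIndex ci2chr) sl ci).length = ci2chr.length := by
        rw [length_pvStep]; exact hlen
      rw [List.foldl_cons, ih _ hlen' j hj]
      cases hget : (pvIndex ci2chr).get? ci with
      | none =>
          have hred : pvStep (pvIndex ci2chr) sl ci = sl := by
            unfold pvStep; rw [hget]
          have hne : (ci2chr[j]'(by omega)).1 ≠ ci := by
            intro heq
            have hcontra : (pvIndex ci2chr).get? ci = some ((j : Int), (ci2chr[j]'(by omega)).2) := by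
              rw [pvIndex_get?_eq_some_iff ci2chr h]
              exact ⟨j, by omega, heq, rfl⟩
            rw [hget] at hcontra; simp at hcontra
          rw [hred]
          simp [hne]
      | some hit =>
          obtain ⟨j', hj', hkey, hpr⟩ := (pvIndex_get?_eq_some_iff ci2chr h ci hit).mp hget
          have hred : pvStep (pvIndex ci2chr) sl ci = sl.set j' (ci2chr[j']'(by omega)).2 := by
            unfold pvStep; rw [hget]
            show PySem.List.pySetD sl hit.1 hit.2 = _
            rw [hpr]; exact PySem.List.pySetD_natCast (by omega) ..
          rw [hred, List.getElem?_set]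
          by_cases heq : (ci2chr[j]'(by omega)).1 = ci
          · have hjj : j = j' := by
              have h1 : (ci2chr.map Prod.fst)[j]'(by simpa using hj) =
                        (ci2chr.map Prod.fst)[j']'(by simpa using hj') := by
                simp only [List.getElem_map]
                rw [heq, hkey]
              exact h.getElem_inj_iff.mp h1
            subst hjj
            simp [heq]
            exact fun _ => by omega
          · have hjj : j' ≠ j := by
              intro hc; subst hc; exact heq hkey
            simp [heq, hjj]

theorem slots_eq (ci2chr : List (String × String)) (h : (ci2chr.map Prod.fst).Nodup)
    (chkin : List String) :
    chkin.foldl (pvStep (pvIndex ci2chr)) (List.replicate ci2chr.length ".") =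
      ci2chr.map (fun q => if chkin.contains q.1 then q.2 else ".") := by
  have hlenL : ∀ (l : List String) (sl : List String),
      (l.foldl (pvStep (pvIndex ci2chr)) sl).length = sl.length := by
    intro l
    induction l with
    | nil => intro sl; rfl
    | cons x xs ih => intro sl; rw [List.foldl_cons, ih, length_pvStep]
  apply List.ext_getElem?
  intro j
  by_cases hj : j < ci2chr.length
  · rw [foldl_pvStep_getElem? ci2chr h chkin _ (by simp) j hj]
    rw [List.getElem?_map]
    have hrep : (List.replicate ci2chr.length ".")[j]? = some "." := by
      simp [hj]
    rw [hrep]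
    have hsome : ci2chr[j]? = some (ci2chr[j]'hj) := List.getElem?_eq_getElem hj
    rw [hsome]
    by_cases hmem : (ci2chr[j]'hj).1 ∈ chkin
    · simp [hmem]
    · simp [hmem]
  · have h1 : (chkin.foldl (pvStep (pvIndex ci2chr)) (List.replicate ci2chr.length "."))[j]? = none := by
      apply List.getElem?_eq_none
      rw [hlenL]; simp; omega
    have h2 : (ci2chr.map (fun q => if chkin.contains q.1 then q.2 else "."))[j]? = none := by
      apply List.getElem?_eq_none; simp; omega
    rw [h1, h2]

-- ===== VERDICT (by name: the statement is the Claim_ definition above) =====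
theorem get_data_letterstr_py_spec : Claim_equal_get_data_letterstr_py := by
  intro f ci2chr _hdom hpre
  unfold Spec_get_data_letterstr_py
  unfold get_data_letterstr_py get_data_letterstr_py_alt
  cases f with
  | none => rfl
  | some items =>
      simp only
      congr 1
      funext acc p
      rw [slots_eq ci2chr hpre p.2]
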